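-- pv_equiv track=rewrite | github.com/miguecarrera/Python | cadenas/02b.py | replace_2
-- ===== SOURCE A (Python) =====
-- def replace_2(cad, num, car=""):
--     contador = 0
--     salida = ""
--     for letra in cad:
--         if contador >= num:
--             salida += letra
--         else:
--             if letra == " ":
--                 salida += car
--                 contador += 1
--             else:
--                 salida += letra
--
--     return salida
-- ===== SOURCE B (Python) =====
-- def replace_2(cad, num, car=""):
--     if num <= 0:
--         return cad
--     return cad.replace(" ", car, num)
-- ===== Notes on version B (the rewrite author's own statement) =====
-- stated objective: idiomatic
-- what changed: A's character-by-character loop with a manual counter and repeated string concatenation is replaced by a no-op guard plus a single str.replace(' ', car, num) call with a count.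
import Mathlib
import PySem

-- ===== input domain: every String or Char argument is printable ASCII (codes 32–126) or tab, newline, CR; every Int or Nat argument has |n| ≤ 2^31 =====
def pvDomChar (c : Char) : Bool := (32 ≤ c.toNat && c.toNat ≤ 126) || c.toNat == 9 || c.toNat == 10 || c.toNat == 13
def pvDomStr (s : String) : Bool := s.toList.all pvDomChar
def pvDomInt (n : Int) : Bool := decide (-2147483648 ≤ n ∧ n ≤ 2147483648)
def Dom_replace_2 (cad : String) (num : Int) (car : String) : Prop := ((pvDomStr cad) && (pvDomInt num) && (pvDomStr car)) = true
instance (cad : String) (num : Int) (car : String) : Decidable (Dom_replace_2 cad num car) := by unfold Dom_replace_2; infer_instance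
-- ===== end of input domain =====

-- B replaces A's character loop with a manual counter by a no-op guard plus a single
-- count-bounded replace of the first `num` spaces (idiomatic; same behaviour).

-- ===== PORT A =====
-- the for-loop over cad with state (contador, salida), branches in A's order
def replace_2_loop (carL : List Char) (num : Int) :
    List Char → Int → List Char → List Char
  | [], _, salida => salida
  | letra :: rest, contador, salida =>
    if contador ≥ num then
      replace_2_loop carL num rest contador (salida ++ [letra])
    else
      if letra = ' ' then
        replace_2_loop carL num rest (contador + 1) (salida ++ carL)
      else
        replace_2_loop carL num rest contador (salida ++ [letra])

def replace_2 (cad : String) (num : Int) (car : String) : String :=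
  String.ofList (replace_2_loop car.toList num cad.toList 0 [])

-- ===== PORT B =====
-- hand port of Python's `cad.replace(" ", car, num)` (single-char old, count-bounded):
-- replaces the first `n` occurrences of ' ' left to right; exact for count ≥ 0.
def replaceSpacesCount (carL : List Char) : List Char → Int → List Char
  | [], _ => []
  | c :: rest, n =>
    if n > 0 ∧ c = ' ' then carL ++ replaceSpacesCount carL rest (n - 1)
    else c :: replaceSpacesCount carL rest n

def replace_2_alt (cad : String) (num : Int) (car : String) : String :=
  if num ≤ 0 then cad
  else String.ofList (replaceSpacesCount car.toList cad.toList num)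

-- ===== PRECONDITION & SPEC =====
def Spec_replace_2 (cad : String) (num : Int) (car : String) (out : String) : Prop := out = replace_2_alt cad num car
instance (cad : String) (num : Int) (car : String) (out : String) : Decidable (Spec_replace_2 cad num car out) := by unfold Spec_replace_2; infer_instance

-- ===== CLAIM (what is proved, stated in full; the proofs are below) =====
def Claim_equal_replace_2 : Prop := ∀ (cad : String) (num : Int) (car : String), Dom_replace_2 cad num car → Spec_replace_2 cad num car (replace_2 cad num car)

-- ===== LEMMAS AND PROOFS =====

-- A's loop, started with counter `contador`, appends to `salida` exactly the
-- count-bounded replacement with remaining budget `num - contador`.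
theorem replace_2_loop_eq (carL : List Char) (num : Int) :
    ∀ (cs : List Char) (contador : Int) (salida : List Char),
      replace_2_loop carL num cs contador salida =
        salida ++ replaceSpacesCount carL cs (num - contador) := by
  intro cs
  induction cs with
  | nil => intro contador salida; simp [replace_2_loop, replaceSpacesCount]
  | cons c rest ih =>
    intro contador salida
    by_cases h : contador ≥ num
    · have hn : ¬ (num - contador > 0 ∧ c = ' ') := by
        rintro ⟨h1, _⟩; omega
      simp [replace_2_loop, replaceSpacesCount, h, ih]
    · by_cases hc : c = ' '
      · have hn : num - contador > 0 ∧ c = ' ' := ⟨by omega, hc⟩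
        have : num - (contador + 1) = num - contador - 1 := by omega
        simp [replace_2_loop, replaceSpacesCount, h, hc, ih, this]
      · have hn : ¬ (num - contador > 0 ∧ c = ' ') := by
          rintro ⟨_, h2⟩; exact hc h2
        simp [replace_2_loop, replaceSpacesCount, h, hc, ih]

-- with a non-positive budget the replacement is the identity
theorem replaceSpacesCount_nonpos (carL : List Char) :
    ∀ (cs : List Char) (n : Int), n ≤ 0 → replaceSpacesCount carL cs n = cs := by
  intro cs
  induction cs with
  | nil => intro n _; simp [replaceSpacesCount]
  | cons c rest ih =>
    intro n hn
    have h : ¬ (n > 0 ∧ c = ' ') := by rintro ⟨h1, _⟩; omega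
    simp [replaceSpacesCount, h, ih n hn]

-- ===== VERDICT (by name: the statement is the Claim_ definition above) =====
theorem replace_2_spec : Claim_equal_replace_2 := by
  intro cad num car _
  unfold Spec_replace_2 replace_2 replace_2_alt
  rw [replace_2_loop_eq]
  by_cases h : num ≤ 0
  · rw [replaceSpacesCount_nonpos car.toList cad.toList (num - 0) (by omega)]
    simp [h, String.ofList_toList]
  · simp [h]
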